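-- pv_equiv track=rewrite | github.com/MichalPutos/hadik | snek_kek_ultimate.py | draw_snek_2
-- ===== SOURCE A (Python) =====
-- def draw_snek_2(board, pos_list, head):
--     first = True
--     for pos in pos_list:
--         pos_x = pos[0]
--         pos_y = pos[1]
--         orientation = pos[2]
--         line_count = 0
--         updated_board = []
--         for line in board:
--             if line_count == pos_y:
--                 if first:
--                     updated_line = line[:pos_x - 1] + head + line[pos_x:-1] + '#'
--                     updated_board.append(updated_line)
--                     first = False
--                     line_count += 1
--                 else:
--                     updated_line = line[:pos_x - 1] + orientation + line[pos_x:-1] + '#'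
--                     updated_board.append(updated_line)
--                     line_count += 1
--             else:
--                 line_count += 1
--                 updated_board.append(line)
--         board = updated_board
--     return board
-- ===== SOURCE B (Python) =====
-- def draw_snek_2(board, pos_list, head):
--     lines = list(board)
--     first = True
--     for x, y, orientation in pos_list:
--         if 0 <= y < len(lines):
--             line = lines[y]
--             lines[y] = line[:x - 1] + (head if first else orientation) + line[x:-1] + '#'
--             first = False
--     return lines
-- ===== Notes on version B (the rewrite author's own statement) =====
-- stated objective: faster
-- what changed: B keeps one mutable list of lines and, per snake position, rewrites only the target line (guarded by an in-range check), instead of A's rebuilding the entire board with an inner line-counting loop for every position.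
import Mathlib
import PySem

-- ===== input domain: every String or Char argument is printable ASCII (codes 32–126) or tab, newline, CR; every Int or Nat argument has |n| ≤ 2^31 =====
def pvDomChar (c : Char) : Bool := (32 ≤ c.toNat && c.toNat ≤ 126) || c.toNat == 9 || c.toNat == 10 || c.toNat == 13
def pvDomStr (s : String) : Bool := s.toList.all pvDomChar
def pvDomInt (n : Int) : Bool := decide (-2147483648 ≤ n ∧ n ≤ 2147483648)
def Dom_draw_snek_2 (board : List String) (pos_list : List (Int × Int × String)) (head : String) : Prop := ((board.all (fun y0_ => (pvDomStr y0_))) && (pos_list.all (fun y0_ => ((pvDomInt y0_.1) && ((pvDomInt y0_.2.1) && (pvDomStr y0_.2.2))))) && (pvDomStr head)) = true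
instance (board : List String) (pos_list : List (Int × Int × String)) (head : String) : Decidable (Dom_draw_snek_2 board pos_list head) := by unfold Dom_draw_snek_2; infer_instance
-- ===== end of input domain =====

-- B only rewrites the one target line per position instead of rebuilding the whole board
-- per position: O(P·W + L) work instead of A's O(P·(L + W)); objective: faster (constant/asymptotic in L·P).

-- shared stamp: line[:x-1] + ch + line[x:-1] + '#'  (exact Python slice semantics via PySem)
def pvStamp (line : String) (x : Int) (ch : String) : String :=
  String.ofList (PySem.Chars.slice line.toList none (some (x - 1)) ++ ch.toList ++
                 PySem.Chars.slice line.toList (some x) (some (-1)) ++ ['#'])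

-- ===== PORT A =====
-- inner loop body of A: state (line_count, updated_board, first)
def pvInnerStepA (pos_y pos_x : Int) (head orientation : String)
    (acc : Int × List String × Bool) (line : String) : Int × List String × Bool :=
  if acc.1 = pos_y then
    if acc.2.2 then (acc.1 + 1, acc.2.1 ++ [pvStamp line pos_x head], false)
    else (acc.1 + 1, acc.2.1 ++ [pvStamp line pos_x orientation], acc.2.2)
  else (acc.1 + 1, acc.2.1 ++ [line], acc.2.2)

-- outer loop body of A: rebuild the whole board for this position
def pvStepA (head : String) (st : List String × Bool) (pos : Int × Int × String) :
    List String × Bool :=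
  let r := st.1.foldl (pvInnerStepA pos.2.1 pos.1 head pos.2.2) (0, [], st.2)
  (r.2.1, r.2.2)

def draw_snek_2 (board : List String) (pos_list : List (Int × Int × String)) (head : String) : List String :=
  (pos_list.foldl (pvStepA head) (board, true)).1

-- ===== PORT B =====
-- B's loop body: update only the target line (if the row index is in range)
def pvStepB (head : String) (st : List String × Bool) (p : Int × Int × String) :
    List String × Bool :=
  if 0 ≤ p.2.1 ∧ p.2.1 < (st.1.length : Int) then
    (st.1.set p.2.1.toNat
       (pvStamp (st.1.getD p.2.1.toNat "") p.1 (if st.2 then head else p.2.2)), false)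
  else st

def draw_snek_2_alt (board : List String) (pos_list : List (Int × Int × String)) (head : String) : List String :=
  (pos_list.foldl (pvStepB head) (board, true)).1

-- ===== PRECONDITION & SPEC =====
def Spec_draw_snek_2 (board : List String) (pos_list : List (Int × Int × String)) (head : String) (out : List String) : Prop := out = draw_snek_2_alt board pos_list head
instance (board : List String) (pos_list : List (Int × Int × String)) (head : String) (out : List String) : Decidable (Spec_draw_snek_2 board pos_list head out) := by unfold Spec_draw_snek_2; infer_instance

-- ===== CLAIM (what is proved, stated in full; the proofs are below) =====
def Claim_equal_draw_snek_2 : Prop := ∀ (board : List String) (pos_list : List (Int × Int × String)) (head : String), Dom_draw_snek_2 board pos_list head → Spec_draw_snek_2 board pos_list head (draw_snek_2 board pos_list head)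

-- ===== LEMMAS AND PROOFS =====

-- A's inner rebuild of the board equals "set the line at index pos_y (if in range)".
lemma pvInnerA_spec (pos_y pos_x : Int) (head orientation : String) :
    ∀ (board : List String) (c : Int) (acc : List String) (first : Bool),
      board.foldl (pvInnerStepA pos_y pos_x head orientation) (c, acc, first) =
        (c + board.length,
         (if c ≤ pos_y ∧ pos_y < c + board.length then
            acc ++ board.set (pos_y - c).toNat
              (pvStamp (board.getD (pos_y - c).toNat "") pos_x
                 (if first then head else orientation))
          else acc ++ board),
         if c ≤ pos_y ∧ pos_y < c + board.length then false else first)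
  | [], c, acc, first => by
      have h : ¬ (c ≤ pos_y ∧ pos_y < c + (([] : List String).length : Int)) := by
        simp only [List.length_nil, Nat.cast_zero]; omega
      rw [if_neg h, if_neg h]
      simp
  | line :: rest, c, acc, first => by
      simp only [List.foldl_cons, pvInnerStepA]
      by_cases hc : c = pos_y
      · subst hc
        have hcond : c ≤ c ∧ c < c + ((line :: rest).length : Int) := by
          simp only [List.length_cons, Nat.cast_add, Nat.cast_one]; omega
        have hnot : ¬ (c + 1 ≤ c ∧ c < c + 1 + (rest.length : Int)) := by omega
        by_cases hf : first
        · simp only [hf, if_true]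
          rw [pvInnerA_spec c pos_x head orientation rest (c+1)]
          rw [if_neg hnot, if_neg hnot, if_pos hcond, if_pos hcond]
          refine Prod.ext ?_ (Prod.ext ?_ ?_)
          · simp only [List.length_cons, Nat.cast_add, Nat.cast_one]; omega
          · simp
          · simp
        · have hf' : first = false := by simpa using hf
          simp only [hf', Bool.false_eq_true, if_false]
          rw [if_pos trivial]
          rw [pvInnerA_spec c pos_x head orientation rest (c+1)]
          rw [if_neg hnot, if_neg hnot, if_pos hcond, if_pos hcond]
          refine Prod.ext ?_ (Prod.ext ?_ ?_)
          · simp only [List.length_cons, Nat.cast_add, Nat.cast_one]; omega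
          · simp
          · simp
      · simp only [if_neg hc]
        rw [pvInnerA_spec pos_y pos_x head orientation rest (c+1)]
        by_cases h2 : c + 1 ≤ pos_y ∧ pos_y < c + 1 + (rest.length : Int)
        · have h1 : c ≤ pos_y ∧ pos_y < c + ((line :: rest).length : Int) := by
            simp only [List.length_cons, Nat.cast_add, Nat.cast_one]; omega
          have hidx : (pos_y - c).toNat = (pos_y - (c + 1)).toNat + 1 := by omega
          rw [if_pos h2, if_pos h2, if_pos h1, if_pos h1, hidx]
          refine Prod.ext ?_ (Prod.ext ?_ ?_)
          · simp only [List.length_cons, Nat.cast_add, Nat.cast_one]; omega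
          · simp [List.set_cons_succ]
          · rfl
        · have h1 : ¬ (c ≤ pos_y ∧ pos_y < c + ((line :: rest).length : Int)) := by
            simp only [List.length_cons, Nat.cast_add, Nat.cast_one]
            omega
          rw [if_neg h2, if_neg h2, if_neg h1, if_neg h1]
          refine Prod.ext ?_ (Prod.ext ?_ ?_)
          · simp only [List.length_cons, Nat.cast_add, Nat.cast_one]; omega
          · simp
          · rfl

-- the two loop bodies agree
lemma pvStep_eq (head : String) : pvStepA head = pvStepB head := by
  funext st p
  obtain ⟨board, first⟩ := st
  obtain ⟨x, y, o⟩ := p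
  simp only [pvStepA, pvStepB]
  rw [pvInnerA_spec]
  by_cases h : 0 ≤ y ∧ y < (board.length : Int)
  · simp [h]
  · have h' : ¬ ((0:Int) ≤ y ∧ y < 0 + board.length) := by omega
    simp [h]

-- ===== VERDICT (by name: the statement is the Claim_ definition above) =====
theorem draw_snek_2_spec : Claim_equal_draw_snek_2 := by
  intro board pos_list head _
  show _ = _
  unfold draw_snek_2 draw_snek_2_alt
  rw [pvStep_eq]
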